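-- pv_equiv track=rewrite | github.com/enarjord/passivbot | scripts/verify_bitget_ohlcv.py | _collapse_missing
-- ===== SOURCE A (Python) =====
-- from typing import List, Tuple
--
-- def _collapse_missing(missing: List[int], step_ms: int) -> List[Tuple[int, int]]:
--     spans = []
--     missing = sorted(missing)
--     if not missing:
--         return spans
--     start = missing[0]
--     prev = missing[0]
--     for ts in missing[1:]:
--         if ts == prev + step_ms:
--             prev = ts
--             continue
--         spans.append((start, prev))
--         start = ts
--         prev = ts
--     spans.append((start, prev))
--     return spans
-- ===== SOURCE B (Python) =====
-- from typing import List, Tuple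
--
-- def _collapse_missing(missing: List[int], step_ms: int) -> List[Tuple[int, int]]:
--     xs = sorted(missing)
--     if not xs:
--         return []
--     # boundary pairs: each adjacent pair that does NOT continue a run
--     gaps = [(a, b) for a, b in zip(xs, xs[1:]) if b != a + step_ms]
--     starts = [xs[0]] + [b for _, b in gaps]
--     ends = [a for a, _ in gaps] + [xs[-1]]
--     return list(zip(starts, ends))
-- ===== Notes on version B (the rewrite author's own statement) =====
-- stated objective: alternative
-- what changed: Replaces the stateful start/prev scan with a boundary-pair pass: collect adjacent pairs that break a run from zip(xs, xs[1:]), then zip the derived start and end lists.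
import Mathlib
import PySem

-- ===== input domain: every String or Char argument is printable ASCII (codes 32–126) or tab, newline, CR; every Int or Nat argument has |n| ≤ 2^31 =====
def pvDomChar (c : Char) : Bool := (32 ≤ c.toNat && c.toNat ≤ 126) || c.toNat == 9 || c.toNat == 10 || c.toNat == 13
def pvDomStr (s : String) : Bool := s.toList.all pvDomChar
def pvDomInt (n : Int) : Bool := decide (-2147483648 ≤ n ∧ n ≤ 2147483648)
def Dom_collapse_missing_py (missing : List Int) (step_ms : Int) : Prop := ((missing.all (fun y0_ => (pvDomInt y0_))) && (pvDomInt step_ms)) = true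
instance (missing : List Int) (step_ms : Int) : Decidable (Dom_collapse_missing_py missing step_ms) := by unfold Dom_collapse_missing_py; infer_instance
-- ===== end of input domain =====

-- B collapses sorted timestamps into spans by collecting run-breaking adjacent pairs and zipping
-- the derived start/end lists, instead of A's stateful start/prev scan (alternative decomposition).


-- ===== PORT A =====
def collapse_missing_py (missing : List Int) (step_ms : Int) : List (Int × Int) :=
  let ms := PySem.List.sorted missing (fun x => x) false
  match ms with
  | [] => []
  | m0 :: rest =>
    let st := rest.foldl
      (fun (s : List (Int × Int) × Int × Int) ts =>
        if ts = s.2.2 + step_ms then (s.1, s.2.1, ts)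
        else (s.1 ++ [(s.2.1, s.2.2)], ts, ts))
      ([], m0, m0)
    st.1 ++ [(st.2.1, st.2.2)]

-- ===== PORT B =====
-- adjacent pairs that do not continue a run: [(a,b) for a,b in zip(xs, xs[1:]) if b != a+step]
def pyGaps (xs : List Int) (step_ms : Int) : List (Int × Int) :=
  (xs.zip xs.tail).filter (fun p => decide (p.2 ≠ p.1 + step_ms))

def collapse_missing_py_alt (missing : List Int) (step_ms : Int) : List (Int × Int) :=
  let xs := PySem.List.sorted missing (fun x => x) false
  match xs with
  | [] => []
  | h :: t =>
    let gaps := pyGaps (h :: t) step_ms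
    let starts := h :: gaps.map Prod.snd
    let ends := gaps.map Prod.fst ++ [t.getLastD h]
    starts.zip ends

-- ===== PRECONDITION & SPEC =====
def Spec_collapse_missing_py (missing : List Int) (step_ms : Int) (out : List (Int × Int)) : Prop := out = collapse_missing_py_alt missing step_ms
instance (missing : List Int) (step_ms : Int) (out : List (Int × Int)) : Decidable (Spec_collapse_missing_py missing step_ms out) := by unfold Spec_collapse_missing_py; infer_instance

-- ===== CLAIM (what is proved, stated in full; the proofs are below) =====
def Claim_equal_collapse_missing_py : Prop := ∀ (missing : List Int) (step_ms : Int), Dom_collapse_missing_py missing step_ms → Spec_collapse_missing_py missing step_ms (collapse_missing_py missing step_ms)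

-- ===== LEMMAS AND PROOFS =====

theorem getLastD_cons' (a d : Int) (l : List Int) :
    (a :: l).getLast?.getD d = l.getLast?.getD a := by
  cases l with
  | nil => rfl
  | cons b r =>
    obtain ⟨x, hx⟩ := Option.isSome_iff_exists.mp (List.getLast?_isSome.mpr (List.cons_ne_nil b r))
    simp [List.getLast?_cons_cons, hx]

-- A's loop as structural recursion (spans emitted in order).
def loopA (step start prev : Int) : List Int → List (Int × Int)
  | [] => [(start, prev)]
  | ts :: r =>
    if ts = prev + step then loopA step start ts r
    else (start, prev) :: loopA step ts ts r

-- A's foldl equals loopA.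
theorem foldA_eq_loopA (step : Int) (l : List Int) :
    ∀ (spans : List (Int × Int)) (start prev : Int),
    (let st := l.foldl
        (fun (s : List (Int × Int) × Int × Int) ts =>
          if ts = s.2.2 + step then (s.1, s.2.1, ts)
          else (s.1 ++ [(s.2.1, s.2.2)], ts, ts))
        (spans, start, prev)
     st.1 ++ [(st.2.1, st.2.2)]) = spans ++ loopA step start prev l := by
  induction l with
  | nil => intro spans start prev; simp [loopA]
  | cons ts r ih =>
    intro spans start prev
    by_cases h : ts = prev + step
    · simp only [List.foldl_cons, loopA, h]
      exact ih spans start (prev + step)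
    · simp only [List.foldl_cons, loopA, if_neg h]
      rw [ih (spans ++ [(start, prev)]) ts ts]
      simp

-- loopA equals B's boundary-pair decomposition.
theorem loopA_eq_zip (step : Int) (rest : List Int) :
    ∀ (start prev : Int),
    loopA step start prev rest =
      (start :: (pyGaps (prev :: rest) step).map Prod.snd).zip
        ((pyGaps (prev :: rest) step).map Prod.fst ++ [rest.getLastD prev]) := by
  induction rest with
  | nil => intro start prev; simp [loopA, pyGaps]
  | cons ts r ih =>
    intro start prev
    by_cases h : ts = prev + step
    · simp only [loopA, if_pos h]
      rw [ih start ts]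
      simp [pyGaps, h, getLastD_cons']
    · simp only [loopA, if_neg h]
      rw [ih ts ts]
      simp [pyGaps, h, getLastD_cons']

-- ===== VERDICT (by name: the statement is the Claim_ definition above) =====
theorem collapse_missing_py_spec : Claim_equal_collapse_missing_py := by
  intro missing step_ms _
  unfold Spec_collapse_missing_py collapse_missing_py collapse_missing_py_alt
  cases hs : PySem.List.sorted missing (fun x => x) false with
  | nil => simp
  | cons h t =>
    simp only []
    rw [foldA_eq_loopA step_ms t [] h h, loopA_eq_zip step_ms t h h]
    simp
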